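-- pv_equiv track=rewrite | github.com/rpatid10/pyspark-coding-example | InterviewPreparationCodingRound/visa/zikzac.py | zigzac
-- ===== SOURCE A (Python) =====
-- def zigzac(str):
--     if len(str)<3:
--         return False
--
--     for i in range(len(str)-2):
--         a,b,c=str[i],str[i+1],str[i+2]
--         if not ((a<b>c) or (a>b<c)):
--             return False
--     return True
-- ===== SOURCE B (Python) =====
-- def zigzac(str):
--     if len(str) < 3:
--         return False
--     signs = [(y > x) - (y < x) for x, y in zip(str, str[1:])]
--     return all(a * b == -1 for a, b in zip(signs, signs[1:]))
-- ===== Notes on version B (the rewrite author's own statement) =====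
-- stated objective: alternative
-- what changed: Replaces the single pass over index triples testing (a<b>c) or (a>b<c) by two passes: first build the list of pairwise comparison signs of consecutive characters, then check that every adjacent pair of signs multiplies to -1.
import Mathlib
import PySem

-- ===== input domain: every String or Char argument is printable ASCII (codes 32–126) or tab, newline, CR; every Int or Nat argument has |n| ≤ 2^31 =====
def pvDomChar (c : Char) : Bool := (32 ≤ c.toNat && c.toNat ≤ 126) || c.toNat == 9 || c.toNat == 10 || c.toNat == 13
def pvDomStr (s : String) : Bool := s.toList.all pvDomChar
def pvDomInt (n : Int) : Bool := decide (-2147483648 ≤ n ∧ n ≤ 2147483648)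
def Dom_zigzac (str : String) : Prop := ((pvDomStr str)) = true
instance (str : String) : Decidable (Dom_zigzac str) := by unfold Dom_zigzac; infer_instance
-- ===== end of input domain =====

-- B is an alternative two-pass decomposition (signs list, then alternation check); same O(n) cost.

-- ===== PORT A =====
-- the for-loop over i with the sliding window str[i],str[i+1],str[i+2] as structural recursion on the window
def zigzacGo : List Char → Bool
  | a :: b :: c :: rest =>
    if ¬ ((a < b ∧ c < b) ∨ (b < a ∧ b < c)) then false else zigzacGo (b :: c :: rest)
  | _ => true

def zigzac (str : String) : Bool :=
  let l := str.toList
  if l.length < 3 then false else zigzacGo l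

-- ===== PORT B =====
def pvSign (x y : Char) : Int := (if y > x then 1 else 0) - (if y < x then 1 else 0)

-- signs = [(y > x) - (y < x) for x, y in zip(str, str[1:])]
def pvSigns (l : List Char) : List Int := (l.zip l.tail).map (fun p => pvSign p.1 p.2)

-- all(a * b == -1 for a, b in zip(signs, signs[1:]))
def pvAlternates (signs : List Int) : Bool := (signs.zip signs.tail).all (fun q => q.1 * q.2 == -1)

def zigzac_alt (str : String) : Bool :=
  let l := str.toList
  if l.length < 3 then false else pvAlternates (pvSigns l)

-- ===== PRECONDITION & SPEC =====
def Spec_zigzac (str : String) (out : Bool) : Prop := out = zigzac_alt str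
instance (str : String) (out : Bool) : Decidable (Spec_zigzac str out) := by unfold Spec_zigzac; infer_instance

-- ===== CLAIM (what is proved, stated in full; the proofs are below) =====
def Claim_equal_zigzac : Prop := ∀ (str : String), Dom_zigzac str → Spec_zigzac str (zigzac str)

-- ===== LEMMAS AND PROOFS =====
theorem pvSign_mul_neg_one (a b c : Char) :
    (pvSign a b * pvSign b c == -1) = decide ((a < b ∧ c < b) ∨ (b < a ∧ b < c)) := by
  simp only [pvSign, gt_iff_lt]
  rcases lt_trichotomy a b with h | h | h <;>
    rcases lt_trichotomy b c with h' | h' | h' <;>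
      simp [h, h', not_lt_of_gt]

theorem alternates_eq_go : ∀ l, pvAlternates (pvSigns l) = zigzacGo l
  | [] => rfl
  | [_] => rfl
  | [_, _] => rfl
  | a :: b :: c :: r => by
    have ih := alternates_eq_go (b :: c :: r)
    simp only [pvSigns, pvAlternates, List.zip, List.tail, List.zipWith, List.map,
      List.all_cons, zigzacGo] at ih ⊢
    rw [pvSign_mul_neg_one]
    by_cases h : (a < b ∧ c < b) ∨ (b < a ∧ b < c)
    · simpa [h] using ih
    · simp [h]
  termination_by l => l.length

-- ===== VERDICT (by name: the statement is the Claim_ definition above) =====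
theorem zigzac_spec : Claim_equal_zigzac := by
  intro str _
  unfold Spec_zigzac zigzac zigzac_alt
  simp only
  split
  · rfl
  · exact (alternates_eq_go str.toList).symm
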